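-- pv_equiv track=rewrite | github.com/NguyenMaiChiTan/SE355_ML-and-Application | 21521414/167_Python_Homework/bai_66.py | findEvenNumber
-- ===== SOURCE A (Python) =====
-- def findEvenNumber(n):
--     existEvenNumber = False;
--     if n > 0:
--         tempOfn = n;
--         while (tempOfn != 0):
--             temp = tempOfn % 10
--             if (temp % 2) == 0:
--                 existEvenNumber = True;
--             tempOfn //= 10
--     elif n == 0:
--         existEvenNumber = True;
--     else:
--         existEvenNumber = False;
--     return existEvenNumber;
-- ===== SOURCE B (Python) =====
-- def findEvenNumber(n):
--     if n < 0:
--         return False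
--     return any(int(d) % 2 == 0 for d in str(n))
-- ===== Notes on version B (the rewrite author's own statement) =====
-- stated objective: idiomatic
-- what changed: B tests the digits as characters of str(n) with any() instead of A's while-loop extracting digits arithmetically with % 10 and //= 10 into a mutable flag; a negative guard preserves A's behaviour on non-positive inputs.
import Mathlib
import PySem

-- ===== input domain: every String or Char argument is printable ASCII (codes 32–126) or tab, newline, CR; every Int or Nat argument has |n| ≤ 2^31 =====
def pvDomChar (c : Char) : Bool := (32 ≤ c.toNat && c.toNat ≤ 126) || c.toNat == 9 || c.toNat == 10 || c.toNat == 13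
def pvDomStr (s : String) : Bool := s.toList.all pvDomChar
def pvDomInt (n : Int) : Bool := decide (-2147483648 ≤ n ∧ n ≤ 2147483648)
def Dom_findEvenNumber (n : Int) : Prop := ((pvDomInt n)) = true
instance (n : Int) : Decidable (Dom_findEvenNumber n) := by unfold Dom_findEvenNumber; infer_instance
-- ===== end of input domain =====

-- B checks the digits as characters of str(n) with any() instead of A's %10 // 10 while-loop; idiomatic, same cost.


-- ===== PORT A =====
-- while (tempOfn != 0): … ; the guard is written 0 < t for termination — equivalent here,
-- since the loop is only entered with n > 0 and tempOfn stays nonnegative.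
def findEvenNumberLoop (t : Int) (acc : Bool) : Bool :=
  if h : 0 < t then
    findEvenNumberLoop (PySem.Int.floordiv t 10)
      (if PySem.Int.mod (PySem.Int.mod t 10) 2 = 0 then true else acc)
  else acc
termination_by t.toNat
decreasing_by
  rw [PySem.Int.floordiv_eq_ediv_of_pos (by omega)]
  omega

def findEvenNumber (n : Int) : Bool :=
  if n > 0 then findEvenNumberLoop n false
  else if n = 0 then true
  else false

-- ===== PORT B =====
-- any(int(d) % 2 == 0 for d in str(n)); int(d) for a digit character d is d.toNat - 48 (exact on '0'..'9')
def findEvenNumber_alt (n : Int) : Bool :=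
  if n < 0 then false
  else (PySem.Int.toChars n).any (fun c => PySem.Int.mod ((c.toNat : Int) - 48) 2 = 0)

-- ===== PRECONDITION & SPEC =====
def Spec_findEvenNumber (n : Int) (out : Bool) : Prop := out = findEvenNumber_alt n
instance (n : Int) (out : Bool) : Decidable (Spec_findEvenNumber n out) := by unfold Spec_findEvenNumber; infer_instance

-- ===== CLAIM (what is proved, stated in full; the proofs are below) =====
def Claim_equal_findEvenNumber : Prop := ∀ (n : Int), Dom_findEvenNumber n → Spec_findEvenNumber n (findEvenNumber n)

-- ===== LEMMAS AND PROOFS =====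

-- hasEven m = "some decimal digit of m is even" (reference recursion both ports are reduced to)
def hasEven (m : Nat) : Bool :=
  if h : m = 0 then false
  else (decide (m % 10 % 2 = 0) || hasEven (m / 10))
termination_by m
decreasing_by exact Nat.div_lt_self (Nat.pos_of_ne_zero h) (by norm_num)

lemma hasEven_pos (m : Nat) (hm : m ≠ 0) :
    hasEven m = (decide (m % 10 % 2 = 0) || hasEven (m / 10)) := by
  rw [hasEven]; rw [dif_neg hm]

lemma loop_eq_hasEven (m : Nat) (acc : Bool) :
    findEvenNumberLoop (m : Int) acc = (acc || hasEven m) := by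
  induction m using Nat.strong_induction_on generalizing acc with
  | _ m ih =>
    by_cases hm : m = 0
    · subst hm
      rw [findEvenNumberLoop, hasEven]
      simp
    · rw [findEvenNumberLoop]
      have h0 : (0 : Int) < (m : Int) := by exact_mod_cast Nat.pos_of_ne_zero hm
      rw [dif_pos h0, hasEven_pos m hm]
      have h1 : PySem.Int.mod ((m : Int)) 10 = ((m % 10 : Nat) : Int) := by
        exact_mod_cast PySem.Int.mod_natCast m 10
      have h2 : PySem.Int.mod (((m % 10 : Nat) : Int)) 2 = ((m % 10 % 2 : Nat) : Int) := by
        exact_mod_cast PySem.Int.mod_natCast (m % 10) 2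
      have h3 : PySem.Int.floordiv ((m : Int)) 10 = ((m / 10 : Nat) : Int) := by
        exact_mod_cast PySem.Int.floordiv_natCast m 10
      rw [h1, h2, h3, ih (m / 10) (Nat.div_lt_self (Nat.pos_of_ne_zero hm) (by norm_num))]
      by_cases hd : m % 10 % 2 = 0
      · rw [if_pos (by exact_mod_cast hd), decide_eq_true hd]
        cases acc <;> cases hasEven (m / 10) <;> rfl
      · rw [if_neg (by exact_mod_cast hd), decide_eq_false hd]
        cases acc <;> cases hasEven (m / 10) <;> rfl

-- the B-side digit test on the character of a digit
lemma digitChar_even (d : Nat) (hd : d < 10) :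
    (decide (PySem.Int.mod (((Nat.digitChar d).toNat : Int) - 48) 2 = 0)) = decide (d % 2 = 0) := by
  interval_cases d <;> decide

lemma toDigitsCore_any (fuel m : Nat) (acc : List Char) (hf : m < fuel) :
    (Nat.toDigitsCore 10 fuel m acc).any
        (fun c => PySem.Int.mod ((c.toNat : Int) - 48) 2 = 0)
      = (decide (m % 10 % 2 = 0) || hasEven (m / 10)
          || acc.any (fun c => PySem.Int.mod ((c.toNat : Int) - 48) 2 = 0)) := by
  induction fuel generalizing m acc with
  | zero => omega
  | succ f ih =>
    rw [Nat.toDigitsCore]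
    by_cases h0 : m / 10 = 0
    · rw [if_pos h0, h0]
      have hE0 : hasEven 0 = false := by rw [hasEven]; rfl
      rw [hE0]
      simp only [List.any_cons]
      rw [digitChar_even (m % 10) (Nat.mod_lt m (by norm_num))]
      cases decide (m % 10 % 2 = 0) <;>
        cases acc.any (fun c => decide (PySem.Int.mod ((c.toNat : Int) - 48) 2 = 0)) <;> rfl
    · rw [if_neg h0]
      have hlt : m / 10 < f := by
        have h10 : 10 ≤ m := by
          by_contra hc
          exact h0 (Nat.div_eq_of_lt (by omega))
        have := Nat.div_lt_self (by omega : 0 < m) (by norm_num : 1 < 10)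
        omega
      rw [ih (m / 10) _ hlt, hasEven_pos (m / 10) h0]
      simp only [List.any_cons]
      rw [digitChar_even (m % 10) (Nat.mod_lt m (by norm_num))]
      cases decide (m % 10 % 2 = 0) <;> cases decide (m / 10 % 10 % 2 = 0) <;>
        cases hasEven (m / 10 / 10) <;>
        cases acc.any (fun c => decide (PySem.Int.mod ((c.toNat : Int) - 48) 2 = 0)) <;> rfl

-- ===== VERDICT (by name: the statement is the Claim_ definition above) =====
theorem findEvenNumber_spec : Claim_equal_findEvenNumber := by
  intro n _
  show findEvenNumber n = findEvenNumber_alt n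
  rcases lt_trichotomy n 0 with hneg | hz | hpos
  · unfold findEvenNumber findEvenNumber_alt
    rw [if_neg (by omega), if_neg (by omega), if_pos hneg]
  · subst hz; decide
  · unfold findEvenNumber findEvenNumber_alt
    rw [if_pos hpos, if_neg (by omega)]
    obtain ⟨m, rfl⟩ : ∃ m : Nat, n = (m : Int) := ⟨n.toNat, by omega⟩
    have hm : m ≠ 0 := by
      intro h; subst h; exact absurd hpos (by norm_num)
    rw [loop_eq_hasEven m false, Bool.false_or]
    unfold PySem.Int.toChars
    rw [if_neg (by omega)]
    have ht : ((m : Int)).toNat = m := by omega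
    rw [ht, Nat.toDigits, toDigitsCore_any (m + 1) m [] (by omega), hasEven_pos m hm]
    rw [List.any_nil, Bool.or_false]
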